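-- pv_equiv track=rewrite | github.com/HarisAhmed1234/PAI | LABS/LAB2/Q2.py | check_last_letter_iterative
-- ===== SOURCE A (Python) =====
-- def check_last_letter_iterative(s):
--     vowels = 'aeiouAEIOU'
--     last_char = ''
--
--     for char in s:
--         if char.isalpha():
--             last_char = char
--
--     if last_char in vowels:
--         return f"The last letter '{last_char}' is a vowel."
--     elif last_char:
--         return f"The last letter '{last_char}' is a consonant."
--     else:
--         return "No alphabetic characters found."
-- ===== SOURCE B (Python) =====
-- def check_last_letter_iterative(s):
--     last_char = next((c for c in reversed(s) if c.isalpha()), '')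
--     if not last_char:
--         return "No alphabetic characters found."
--     if last_char in 'aeiouAEIOU':
--         return f"The last letter '{last_char}' is a vowel."
--     return f"The last letter '{last_char}' is a consonant."
-- ===== Notes on version B (the rewrite author's own statement) =====
-- stated objective: faster
-- what changed: Replaces the forward full-scan accumulator with a reverse search that stops at the first alphabetic character, and restores the intended 'No alphabetic characters found.' answer that A's dead else-branch never reaches.
-- intended difference: On strings with no alphabetic character (including the empty string) A returns the vowel message with an empty quoted letter because '' in 'aeiouAEIOU' is True in Python, while B returns 'No alphabetic characters found.', which is plainly the message the author intended for that case. — e.g. on check_last_letter_iterative("123!"): A returns "The last letter '' is a vowel.", B returns "No alphabetic characters found."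
import Mathlib
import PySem

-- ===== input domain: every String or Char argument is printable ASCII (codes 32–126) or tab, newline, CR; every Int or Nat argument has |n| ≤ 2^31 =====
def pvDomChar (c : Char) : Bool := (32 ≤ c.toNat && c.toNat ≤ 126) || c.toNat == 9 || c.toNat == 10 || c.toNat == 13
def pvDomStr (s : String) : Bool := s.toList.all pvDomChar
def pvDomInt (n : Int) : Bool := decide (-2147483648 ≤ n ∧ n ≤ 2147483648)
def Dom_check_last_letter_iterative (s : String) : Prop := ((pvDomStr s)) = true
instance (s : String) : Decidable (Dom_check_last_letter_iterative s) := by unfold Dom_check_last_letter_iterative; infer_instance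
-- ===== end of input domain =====

-- B searches the last alphabetic char from the end (stopping at the first hit) instead of
-- A's forward full-scan accumulator, and returns the intended no-alphabetic message that
-- A's dead else-branch never reaches ('' in 'aeiouAEIOU' is True in Python).

-- ===== PORT A =====
-- forward loop keeping the last alphabetic char seen ('' ~ []); `last_char in vowels` is a substring test
def check_last_letter_iterative (s : String) : String :=
  let vowels : List Char := "aeiouAEIOU".toList
  let last_char : List Char :=
    s.toList.foldl (fun acc c => if PySem.Chars.isalpha c then [c] else acc) []
  if PySem.Chars.isIn last_char vowels then
    "The last letter '" ++ String.ofList last_char ++ "' is a vowel."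
  else if last_char ≠ [] then
    "The last letter '" ++ String.ofList last_char ++ "' is a consonant."
  else
    "No alphabetic characters found."

-- ===== PORT B =====
-- next((c for c in reversed(s) if c.isalpha()), '') = find? over the reversed list
def check_last_letter_iterative_alt (s : String) : String :=
  match s.toList.reverse.find? (fun c => PySem.Chars.isalpha c) with
  | none => "No alphabetic characters found."
  | some c =>
    if PySem.Chars.isIn [c] "aeiouAEIOU".toList then
      "The last letter '" ++ String.ofList [c] ++ "' is a vowel."
    else
      "The last letter '" ++ String.ofList [c] ++ "' is a consonant."

-- ===== PRECONDITION & SPEC =====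
-- On strings with no alphabetic character A returns "The last letter '' is a vowel."
-- (because '' in 'aeiouAEIOU' is True in Python), while B returns
-- "No alphabetic characters found.", which is plainly the intended message there.
def D_check_last_letter_iterative (s : String) : Prop :=
  s.toList.all (fun c => !PySem.Chars.isalpha c) = true
instance (s : String) : Decidable (D_check_last_letter_iterative s) := by
  unfold D_check_last_letter_iterative; infer_instance

def Spec_check_last_letter_iterative (s : String) (out : String) : Prop :=
  ¬ D_check_last_letter_iterative s → out = check_last_letter_iterative_alt s
instance (s : String) (out : String) : Decidable (Spec_check_last_letter_iterative s out) := by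
  unfold Spec_check_last_letter_iterative; infer_instance

def pvDiffWitness_check_last_letter_iterative : String := "123!"
def pvDiffWitnessOut_check_last_letter_iterative : String × String :=
  ("The last letter '' is a vowel.", "No alphabetic characters found.")

-- ===== CLAIM =====
def Claim_unchanged_check_last_letter_iterative : Prop :=
  ∀ (s : String), Dom_check_last_letter_iterative s →
    Spec_check_last_letter_iterative s (check_last_letter_iterative s)
def Claim_changed_check_last_letter_iterative : Prop :=
  Dom_check_last_letter_iterative (pvDiffWitness_check_last_letter_iterative) ∧
  D_check_last_letter_iterative (pvDiffWitness_check_last_letter_iterative) ∧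
  check_last_letter_iterative (pvDiffWitness_check_last_letter_iterative) = pvDiffWitnessOut_check_last_letter_iterative.1 ∧
  check_last_letter_iterative_alt (pvDiffWitness_check_last_letter_iterative) = pvDiffWitnessOut_check_last_letter_iterative.2 ∧
  pvDiffWitnessOut_check_last_letter_iterative.1 ≠ pvDiffWitnessOut_check_last_letter_iterative.2
def Claim_exact_check_last_letter_iterative : Prop :=
  ∀ (s : String), Dom_check_last_letter_iterative s → D_check_last_letter_iterative s →
    check_last_letter_iterative s ≠ check_last_letter_iterative_alt s

-- ===== LEMMAS AND PROOFS =====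

-- A's accumulator equals the first alphabetic char of the reversed list (or the initial acc)
theorem foldl_last_alpha (l acc : List Char) :
    l.foldl (fun acc c => if PySem.Chars.isalpha c then [c] else acc) acc =
      match l.reverse.find? (fun c => PySem.Chars.isalpha c) with
      | some c => [c]
      | none => acc := by
  induction l generalizing acc with
  | nil => simp
  | cons c t ih =>
    simp only [List.foldl_cons, List.reverse_cons, List.find?_append, ih]
    cases h : t.reverse.find? (fun c => PySem.Chars.isalpha c) with
    | some d => simp
    | none =>
      simp only [Option.none_or, List.find?_singleton]
      by_cases hc : PySem.Chars.isalpha c <;> simp [hc]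

theorem D_iff_find?_none (s : String) :
    D_check_last_letter_iterative s ↔
      s.toList.reverse.find? (fun c => PySem.Chars.isalpha c) = none := by
  simp [D_check_last_letter_iterative, List.find?_eq_none, List.all_eq_true]

-- ===== VERDICT =====
theorem check_last_letter_iterative_spec : Claim_unchanged_check_last_letter_iterative := by
  intro s _ hD
  rw [D_iff_find?_none] at hD
  unfold check_last_letter_iterative check_last_letter_iterative_alt
  simp only [foldl_last_alpha]
  cases h : s.toList.reverse.find? (fun c => PySem.Chars.isalpha c) with
  | none => exact absurd h hD
  | some c => simp

theorem check_last_letter_iterative_changed : Claim_changed_check_last_letter_iterative := by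
  unfold Claim_changed_check_last_letter_iterative; decide

theorem check_last_letter_iterative_tight : Claim_exact_check_last_letter_iterative := by
  intro s _ hD
  have h := (D_iff_find?_none s).mp hD
  unfold check_last_letter_iterative check_last_letter_iterative_alt
  simp only [foldl_last_alpha, h]
  decide
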